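-- pv_equiv track=rewrite | github.com/ehdgua01/Algorithms | algorithms/coding_test/programmers/hash/4.py | solution
-- ===== SOURCE A (Python) =====
-- from collections import defaultdict
--
-- def solution(genres, plays):
--     answer = []
--     summary = list(zip(genres, plays))
--     genres_total_play = defaultdict(lambda: 0)
--     genres_include_song = defaultdict(lambda: [])
--
--     for idx, values in enumerate(summary):
--         g = values[0]
--         gp = values[1]
--         genres_total_play[g] += gp
--         genres_include_song[g].append(idx)
--
--     while genres_total_play:
--         most_plays_count = max(genres_total_play.values())
--         most_plays_genres = ''
--
--         for k in genres_total_play.keys():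
--             if genres_total_play[k] == most_plays_count:
--                 most_plays_genres = k
--
--         del genres_total_play[most_plays_genres]
--
--         if len(genres_include_song[most_plays_genres]) < 2:
--             answer += genres_include_song[most_plays_genres]
--             continue
--
--         temp = {}
--
--         for song_index in genres_include_song[most_plays_genres]:
--             temp[song_index] = summary[song_index][1]
--
--         for i in range(2):
--             song_index = None
--             most_plays = max(temp.values())
--
--             for key in temp.keys():
--                 if most_plays == temp[key]:
--                     song_index = key
--                     answer.append(song_index)
--                     break
--
--             del temp[song_index]
--
--     return answer
-- ===== SOURCE B (Python) =====
-- def solution(genres, plays):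
--     summary = list(zip(genres, plays))
--     order = []                     # genres in first-appearance order
--     total = {}
--     songs = {}
--     for idx, (g, p) in enumerate(summary):
--         if g not in total:
--             order.append(g)
--             total[g] = 0
--             songs[g] = []
--         total[g] += p
--         songs[g].append(idx)
--     # genres by total plays descending; tied genres in reverse first-appearance order
--     ranked = sorted(range(len(order)), key=lambda j: (-total[order[j]], -j))
--     answer = []
--     for j in ranked:
--         g = order[j]
--         # top two songs of the genre: plays descending, index ascending on ties
--         answer += sorted(songs[g], key=lambda i: (-summary[i][1], i))[:2]
--     return answer
-- ===== Notes on version B (the rewrite author's own statement) =====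
-- stated objective: faster
-- what changed: A repeatedly rescans the genre dict for the max total (and the song dict for the max plays) deleting as it goes; B builds the per-genre records in one pass and obtains the same order by sorting genre positions by (-total,-position) and each genre's songs by (-plays,index), taking the first two.
import Mathlib
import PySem

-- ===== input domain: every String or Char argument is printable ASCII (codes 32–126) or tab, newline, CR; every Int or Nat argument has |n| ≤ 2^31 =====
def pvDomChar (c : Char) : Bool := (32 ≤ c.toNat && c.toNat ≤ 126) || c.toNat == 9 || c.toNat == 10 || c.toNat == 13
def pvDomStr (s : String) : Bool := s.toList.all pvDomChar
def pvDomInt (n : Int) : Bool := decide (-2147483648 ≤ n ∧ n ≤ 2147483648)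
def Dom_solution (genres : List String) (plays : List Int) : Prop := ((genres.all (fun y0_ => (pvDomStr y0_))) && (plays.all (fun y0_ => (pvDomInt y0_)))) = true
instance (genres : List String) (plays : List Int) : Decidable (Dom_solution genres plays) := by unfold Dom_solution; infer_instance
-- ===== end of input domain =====

-- B replaces A's repeated max-scan-and-delete over the genre/song dicts by building per-genre
-- records in one pass and sorting (genre positions by (-total,-position); songs by (-plays,index)).


-- ===== PORT A =====
-- the 'while genres_total_play:' loop; fuel = the dict's size makes the recursion structural
-- (each pass deletes one key, so 'gtp.size' fuel is exact); the 'none' fallbacks of max?/find?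
-- are unreachable totality guards (the scanned dicts are nonempty there).
def solutionLoop (summary : List (String × Int)) (gis : PySem.Dict String (List Int)) :
    Nat → PySem.Dict String Int → List Int → List Int
  | 0, _, ans => ans
  | n+1, gtp, ans =>
    if gtp.items.isEmpty then ans else
    match PySem.List.max? gtp.values (fun v => v) with
    | none => ans
    | some m =>
      let g := gtp.keys.foldl (fun acc k => if gtp.getD k 0 == m then k else acc) ""
      let gtp' := gtp.erase g
      let songs := gis.getD g []
      if songs.length < 2 then solutionLoop summary gis n gtp' (ans ++ songs)
      else
        let temp0 : PySem.Dict Int Int := songs.foldl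
          (fun d i => d.insert i (((PySem.List.pyGet? summary i).getD ("", 0)).2)) PySem.Dict.empty
        let st := (PySem.List.pyRange 0 2 1).foldl
          (fun (st : PySem.Dict Int Int × List Int) _ =>
            match PySem.List.max? st.1.values (fun v => v) with
            | none => st
            | some m2 =>
              match st.1.keys.find? (fun k => m2 == st.1.getD k 0) with
              | none => st
              | some k => (st.1.erase k, st.2 ++ [k]))
          (temp0, ans)
        solutionLoop summary gis n gtp' st.2

def solution (genres : List String) (plays : List Int) : List Int :=
  let summary := genres.zip plays
  let st := (PySem.List.enumerate summary 0).foldl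
    (fun (st : PySem.Dict String Int × PySem.Dict String (List Int)) q =>
      (st.1.modify q.2.1 0 (· + q.2.2), st.2.modify q.2.1 [] (· ++ [q.1])))
    (PySem.Dict.empty, PySem.Dict.empty)
  solutionLoop summary st.2 st.1.size st.1 []

-- ===== PORT B =====
def solution_alt (genres : List String) (plays : List Int) : List Int :=
  let summary := genres.zip plays
  let st := (PySem.List.enumerate summary 0).foldl
    (fun (st : List String × PySem.Dict String Int × PySem.Dict String (List Int)) q =>
      let st' := if st.2.1.contains q.2.1 then st
                 else (st.1 ++ [q.2.1], st.2.1.insert q.2.1 0, st.2.2.insert q.2.1 [])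
      (st'.1, st'.2.1.modify q.2.1 0 (· + q.2.2), st'.2.2.modify q.2.1 [] (· ++ [q.1])))
    ([], PySem.Dict.empty, PySem.Dict.empty)
  let ranked := PySem.List.sorted2 (PySem.List.pyRange 0 st.1.length 1)
      (fun j => -(st.2.1.getD ((PySem.List.pyGet? st.1 j).getD "") 0))
      (fun j => -j)
  ranked.foldl (fun ans j =>
      ans ++ PySem.List.slice
        (PySem.List.sorted2 (st.2.2.getD ((PySem.List.pyGet? st.1 j).getD "") [])
          (fun i => -((PySem.List.pyGet? summary i).getD ("", 0)).2)
          (fun i => i))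
        none (some 2)) []

-- ===== PRECONDITION & SPEC =====
def Spec_solution (genres : List String) (plays : List Int) (out : List Int) : Prop := out = solution_alt genres plays
instance (genres : List String) (plays : List Int) (out : List Int) : Decidable (Spec_solution genres plays out) := by unfold Spec_solution; infer_instance

-- ===== CLAIM (what is proved, stated in full; the proofs are below) =====
def Claim_equal_solution : Prop := ∀ (genres : List String) (plays : List Int), Dom_solution genres plays → Spec_solution genres plays (solution genres plays)

-- ===== LEMMAS AND PROOFS =====

-- canonical descriptions of the per-genre data both programs compute
def pvG (s : List (String × Int)) : List String := PySem.Set.ofList (s.map (·.1))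
def pvT (s : List (String × Int)) (g : String) : Int := ((s.filter (fun p => p.1 == g)).map (·.2)).sum
def pvS (s : List (String × Int)) (g : String) : List Int :=
  ((PySem.List.enumerate s 0).filter (fun q => q.2.1 == g)).map (·.1)
def pvE (s : List (String × Int)) : List (String × Int) := (pvG s).map (fun g => (g, pvT s g))
def pvPos (s : List (String × Int)) (g : String) : Int := ((pvG s).idxOf g : Int)
def pvP (s : List (String × Int)) (i : Int) : Int := ((PySem.List.pyGet? s i).getD ("", 0)).2
def pvGet (s : List (String × Int)) (j : Int) : String := (PySem.List.pyGet? (pvG s) j).getD ""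

-- strict / weak lexicographic comparison of two Int keys
def lexlt {α : Type} (k1 k2 : α → Int) (a b : α) : Prop := k1 a < k1 b ∨ (k1 a = k1 b ∧ k2 a < k2 b)
def lexle {α : Type} (k1 k2 : α → Int) (a b : α) : Prop := k1 a < k1 b ∨ (k1 a = k1 b ∧ k2 a ≤ k2 b)

theorem lexle_trans {α : Type} (k1 k2 : α → Int) {a b c : α}
    (h1 : lexle k1 k2 a b) (h2 : lexle k1 k2 b c) : lexle k1 k2 a c := by
  unfold lexle at *; omega

theorem sorted2_eq_foldl {α : Type} (xs : List α) (k1 k2 : α → Int) :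
    PySem.List.sorted2 xs k1 k2 =
      xs.foldl (fun acc x => PySem.List.insertBy
        (fun a b => decide (k1 a < k1 b) || (!decide (k1 b < k1 a) && decide (k2 a < k2 b))) x acc) [] := rfl

theorem before_true_iff {α : Type} (k1 k2 : α → Int) (a b : α) :
    (decide (k1 a < k1 b) || (!decide (k1 b < k1 a) && decide (k2 a < k2 b))) = true ↔ lexlt k1 k2 a b := by
  unfold lexlt; simp; omega

theorem before_false_iff {α : Type} (k1 k2 : α → Int) (a b : α) :
    (decide (k1 a < k1 b) || (!decide (k1 b < k1 a) && decide (k2 a < k2 b))) = false ↔ lexle k1 k2 b a := by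
  unfold lexle; simp; omega

theorem insertBy_pairwise_lexle {α : Type} (k1 k2 : α → Int) (x : α) (ys : List α)
    (h : ys.Pairwise (lexle k1 k2)) :
    (PySem.List.insertBy
      (fun a b => decide (k1 a < k1 b) || (!decide (k1 b < k1 a) && decide (k2 a < k2 b))) x ys).Pairwise
      (lexle k1 k2) := by
  induction ys with
  | nil => simp [PySem.List.insertBy]
  | cons y t ih =>
    rw [List.pairwise_cons] at h
    obtain ⟨hy, ht⟩ := h
    by_cases hb : (decide (k1 x < k1 y) || (!decide (k1 y < k1 x) && decide (k2 x < k2 y))) = true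
    · rw [PySem.List.insertBy, if_pos hb]
      have hxy : lexle k1 k2 x y := by
        have := (before_true_iff k1 k2 x y).mp hb
        unfold lexlt at this; unfold lexle; omega
      refine List.pairwise_cons.mpr ⟨?_, List.pairwise_cons.mpr ⟨hy, ht⟩⟩
      intro z hz
      rcases List.mem_cons.mp hz with hz | hz
      · exact hz ▸ hxy
      · exact lexle_trans k1 k2 hxy (hy z hz)
    · rw [PySem.List.insertBy, if_neg hb]
      have hyx : lexle k1 k2 y x := by
        exact (before_false_iff k1 k2 x y).mp (Bool.not_eq_true _ ▸ hb)
      refine List.pairwise_cons.mpr ⟨?_, ih ht⟩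
      intro z hz
      rcases (PySem.List.mem_insertBy _ _ _ _).mp hz with hz | hz
      · exact hz ▸ hyx
      · exact hy z hz

theorem sorted2_pairwise_lexle {α : Type} (xs : List α) (k1 k2 : α → Int) :
    (PySem.List.sorted2 xs k1 k2).Pairwise (lexle k1 k2) := by
  rw [sorted2_eq_foldl]
  suffices h : ∀ (l : List α) (acc : List α), acc.Pairwise (lexle k1 k2) →
      (l.foldl (fun acc x => PySem.List.insertBy
        (fun a b => decide (k1 a < k1 b) || (!decide (k1 b < k1 a) && decide (k2 a < k2 b))) x acc) acc).Pairwise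
        (lexle k1 k2) by
    exact h xs [] List.Pairwise.nil
  intro l
  induction l with
  | nil => intro acc h; exact h
  | cons x t ih =>
    intro acc h
    exact ih _ (insertBy_pairwise_lexle k1 k2 x acc h)

theorem sorted2_nil {α : Type} (k1 k2 : α → Int) : PySem.List.sorted2 ([] : List α) k1 k2 = [] := rfl

theorem mem_sorted2 {α : Type} (xs : List α) (k1 k2 : α → Int) (a : α) :
    a ∈ PySem.List.sorted2 xs k1 k2 ↔ a ∈ xs := by
  constructor
  · exact fun h => (PySem.List.sorted2_perm xs k1 k2 false).mem_iff.mp h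
  · exact fun h => (PySem.List.sorted2_perm xs k1 k2 false).mem_iff.mpr h

theorem pairwise_sorted_unique {α : Type} (k1 k2 : α → Int) :
    ∀ (ys zs : List α), ys.Pairwise (lexlt k1 k2) → zs.Pairwise (lexle k1 k2) → zs.Perm ys → zs = ys := by
  intro ys
  induction ys with
  | nil => intro zs _ _ h; exact h.eq_nil
  | cons a t ih =>
    intro zs hp hq h
    match zs, h with
    | [], h => exact absurd h.symm (by simp)
    | b :: u, h =>
      rw [List.pairwise_cons] at hp hq
      obtain ⟨ha, ht⟩ := hp
      obtain ⟨hb, hu⟩ := hq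
      have hab : b = a := by
        by_contra hne
        have hain : a ∈ b :: u := h.mem_iff.mpr (List.mem_cons_self)
        have hau : a ∈ u := by
          rcases List.mem_cons.mp hain with h' | h'
          · exact absurd h'.symm hne
          · exact h'
        have h1 : lexle k1 k2 b a := hb a hau
        have hbin : b ∈ a :: t := h.mem_iff.mp (List.mem_cons_self)
        have hbt : b ∈ t := by
          rcases List.mem_cons.mp hbin with h' | h'
          · exact absurd h' hne
          · exact h'
        have h2 : lexlt k1 k2 a b := ha b hbt
        unfold lexle at h1; unfold lexlt at h2; omega
      subst hab
      have := ih u ht hu (h.cons_inv)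
      rw [this]

theorem sorted2_eq_of_pairwise_lexlt {α : Type} (k1 k2 : α → Int) (xs ys : List α)
    (hperm : ys.Perm xs) (hp : ys.Pairwise (lexlt k1 k2)) :
    PySem.List.sorted2 xs k1 k2 = ys := by
  exact pairwise_sorted_unique k1 k2 ys _ hp (sorted2_pairwise_lexle xs k1 k2)
    ((PySem.List.sorted2_perm xs k1 k2 false).trans hperm.symm)

theorem sorted2_cons_min {α : Type} (k1 k2 : α → Int) (xs : List α) (x0 : α) (xs' : List α)
    (hperm : xs.Perm (x0 :: xs'))
    (hmin : ∀ y ∈ xs', lexlt k1 k2 x0 y)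
    (hnd : xs'.Pairwise (fun a b => k2 a ≠ k2 b)) :
    PySem.List.sorted2 xs k1 k2 = x0 :: PySem.List.sorted2 xs' k1 k2 := by
  apply sorted2_eq_of_pairwise_lexlt
  · exact (List.Perm.cons x0 (PySem.List.sorted2_perm xs' k1 k2 false)).trans hperm.symm
  · refine List.pairwise_cons.mpr ⟨?_, ?_⟩
    · intro y hy
      exact hmin y ((mem_sorted2 xs' k1 k2 y).mp hy)
    · have hle := sorted2_pairwise_lexle xs' k1 k2
      have hsymm : ∀ {a b : α}, k2 a ≠ k2 b → k2 b ≠ k2 a := fun h => Ne.symm h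
      have hne : (PySem.List.sorted2 xs' k1 k2).Pairwise (fun a b => k2 a ≠ k2 b) :=
        (List.Perm.pairwise_iff hsymm (PySem.List.sorted2_perm xs' k1 k2 false)).mpr hnd
      exact (hle.and hne).imp (fun h => by
        unfold lexle at h; unfold lexlt; omega)

-- the foldl that keeps the LAST key satisfying a predicate (A's genre-tie scan)
theorem foldl_lastpick {κ : Type} (P : κ → Bool) (init : κ) :
    ∀ ks : List κ, (∃ k ∈ ks, P k = true) →
      ∃ l1 l2, ks = l1 ++ (ks.foldl (fun a k => if P k then k else a) init) :: l2 ∧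
        P (ks.foldl (fun a k => if P k then k else a) init) = true ∧ ∀ k ∈ l2, P k = false := by
  intro ks
  induction ks using List.reverseRecOn with
  | nil => intro h; simp at h
  | append_singleton ks k ih =>
    intro h
    rw [List.foldl_append]
    simp only [List.foldl_cons, List.foldl_nil]
    by_cases hk : P k = true
    · rw [if_pos hk]
      exact ⟨ks, [], by simp, hk, by simp⟩
    · rw [if_neg hk]
      have hex : ∃ x ∈ ks, P x = true := by
        obtain ⟨x, hx, hpx⟩ := h
        rcases List.mem_append.mp hx with h' | h'
        · exact ⟨x, h', hpx⟩
        · simp at h'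
          subst h'
          exact absurd hpx hk
      obtain ⟨l1, l2, hks, hpr, hl2⟩ := ih hex
      refine ⟨l1, l2 ++ [k], ?_, hpr, ?_⟩
      · have h2 : ks ++ [k] = (l1 ++ (List.foldl (fun a k => if P k = true then k else a) init ks) :: l2) ++ [k] := by
          rw [← hks]
        simpa using h2
      · intro x hx
        rcases List.mem_append.mp hx with h' | h'
        · exact hl2 x h'
        · simp at h'; subst h'; simpa using hk

-- running 'd[k] = d.get(k,0) + v' over a pair list accumulates the per-key sum
theorem getD_foldl_modify_sum {κ : Type} [BEq κ] [LawfulBEq κ] [DecidableEq κ]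
    (l : List (κ × Int)) :
    ∀ (d : PySem.Dict κ Int) (c : κ),
      (l.foldl (fun d p => d.modify p.1 0 (· + p.2)) d).getD c 0 =
        d.getD c 0 + ((l.filter (fun p => p.1 == c)).map (·.2)).sum := by
  induction l with
  | nil => intro d c; simp
  | cons p t ih =>
    intro d c
    simp only [List.foldl_cons, ih, List.filter_cons]
    by_cases hc : p.1 = c
    · simp [hc]
      omega
    · have hbc : (p.1 == c) = false := by simpa using hc
      rw [PySem.Dict.getD_modify, if_neg (fun h => hc h.symm)]
      simp [hbc]

-- ===== facts about the canonical data =====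

theorem pvG_nodup (s : List (String × Int)) : (pvG s).Nodup := PySem.Set.nodup_ofList _

theorem pvE_map_fst (s : List (String × Int)) : (pvE s).map (·.1) = pvG s := by
  unfold pvE
  rw [List.map_map]
  exact List.map_id _

theorem pvS_pairwise (s : List (String × Int)) (g : String) : (pvS s g).Pairwise (· < ·) := by
  unfold pvS
  refine List.pairwise_map.mpr ?_
  exact List.Pairwise.sublist List.filter_sublist (PySem.List.pairwise_lt_enumerate s 0)

theorem pvS_nodup (s : List (String × Int)) (g : String) : (pvS s g).Nodup := by
  have := (pvS_pairwise s g).imp (fun {a b} h => Int.ne_of_lt h)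
  exact this

theorem pvGet_pos (s : List (String × Int)) (g : String) (hg : g ∈ pvG s) :
    pvGet s (pvPos s g) = g := by
  unfold pvGet pvPos
  have hlt := List.idxOf_lt_length_of_mem hg
  rw [PySem.List.pyGet?_natCast, List.getElem?_eq_getElem hlt]
  simp [List.getElem_idxOf hlt]

theorem pvG_pairwise_pos (s : List (String × Int)) :
    (pvG s).Pairwise (fun a b => pvPos s a < pvPos s b) := by
  rw [List.pairwise_iff_getElem]
  intro i j hi hj hij
  unfold pvPos
  rw [(pvG_nodup s).idxOf_getElem i hi, (pvG_nodup s).idxOf_getElem j hj]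
  exact_mod_cast hij

theorem map_pos_pvG (s : List (String × Int)) :
    (pvG s).map (pvPos s) = PySem.List.pyRange 0 ((pvG s).length) 1 := by
  apply List.ext_getElem
  · simp [PySem.List.length_pyRange_one]
  · intro i h1 h2
    simp only [List.getElem_map]
    rw [PySem.List.getElem_pyRange_one]
    unfold pvPos
    rw [(pvG_nodup s).idxOf_getElem i (by simpa using h1)]
    simp

-- ===== the two build loops =====

theorem buildA_spec (s : List (String × Int)) :
    ((PySem.List.enumerate s 0).foldl
      (fun (st : PySem.Dict String Int × PySem.Dict String (List Int)) q =>
        (st.1.modify q.2.1 0 (· + q.2.2), st.2.modify q.2.1 [] (· ++ [q.1])))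
      (PySem.Dict.empty, PySem.Dict.empty)).1.items = pvE s ∧
    (∀ g, ((PySem.List.enumerate s 0).foldl
      (fun (st : PySem.Dict String Int × PySem.Dict String (List Int)) q =>
        (st.1.modify q.2.1 0 (· + q.2.2), st.2.modify q.2.1 [] (· ++ [q.1])))
      (PySem.Dict.empty, PySem.Dict.empty)).2.getD g [] = pvS s g) := by
  rw [PySem.List.foldl_prod_mk
    (f := fun (d : PySem.Dict String Int) (q : Int × String × Int) => d.modify q.2.1 0 (· + q.2.2))
    (g := fun (d : PySem.Dict String (List Int)) (q : Int × String × Int) => d.modify q.2.1 [] (· ++ [q.1]))]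
  constructor
  · -- the totals dict: items = pvE s
    have hkeys : ((PySem.List.enumerate s 0).foldl
        (fun (d : PySem.Dict String Int) q => d.modify q.2.1 0 (· + q.2.2)) PySem.Dict.empty).keys = pvG s := by
      rw [PySem.Dict.keys_foldl_modify_key (PySem.List.enumerate s 0) (fun q => q.2.1) 0
        (fun _ q => (· + q.2.2)) PySem.Dict.empty]
      rw [PySem.Dict.keys_empty, PySem.Set.update_nil_left]
      unfold pvG
      congr 1
      have h : (PySem.List.enumerate s 0).map (fun q => q.2.1) =
          ((PySem.List.enumerate s 0).map (fun q => q.2)).map (fun p => p.1) := by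
        rw [List.map_map]; rfl
      rw [h, PySem.List.map_snd_enumerate]
    have hnd : ((PySem.List.enumerate s 0).foldl
        (fun (d : PySem.Dict String Int) q => d.modify q.2.1 0 (· + q.2.2)) PySem.Dict.empty).keys.Nodup := by
      rw [hkeys]; exact pvG_nodup s
    have hT : ∀ g, ((PySem.List.enumerate s 0).foldl
        (fun (d : PySem.Dict String Int) q => d.modify q.2.1 0 (· + q.2.2)) PySem.Dict.empty).getD g 0 = pvT s g := by
      intro g
      have hshape : (PySem.List.enumerate s 0).foldl
          (fun (d : PySem.Dict String Int) q => d.modify q.2.1 0 (· + q.2.2)) PySem.Dict.empty =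
          ((PySem.List.enumerate s 0).map (fun q => (q.2.1, q.2.2))).foldl
          (fun d p => d.modify p.1 0 (· + p.2)) PySem.Dict.empty := by
        rw [List.foldl_map]
      rw [hshape, getD_foldl_modify_sum]
      have h : pvT s g =
          (((PySem.List.enumerate s 0).filter (fun q => q.2.1 == g)).map (fun q => q.2.2)).sum := by
        unfold pvT
        conv_lhs => rw [← PySem.List.map_snd_enumerate s 0]
        rw [List.filter_map, List.map_map]; rfl
      rw [h]
      simp only [List.filter_map, List.map_map, PySem.Dict.getD_empty]
      rw [Int.zero_add]; rfl
    rw [PySem.Dict.items_eq_map_keys _ hnd 0, hkeys]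
    unfold pvE
    exact List.map_congr_left (fun g _ => by rw [hT g])
  · -- the songs dict
    intro g
    have hshape : (PySem.List.enumerate s 0).foldl
        (fun (d : PySem.Dict String (List Int)) q => d.modify q.2.1 [] (· ++ [q.1])) PySem.Dict.empty =
        ((PySem.List.enumerate s 0).map (fun q => (q.2.1, q.1))).foldl
        (fun d p => d.modify p.1 [] (· ++ [p.2])) PySem.Dict.empty := by
      rw [List.foldl_map]
    rw [hshape, PySem.Dict.getD_foldl_modify_append]
    simp only [List.filter_map, List.map_map, PySem.Dict.getD_empty, List.nil_append]
    unfold pvS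
    rfl

def pvStepB (st : List String × PySem.Dict String Int × PySem.Dict String (List Int))
    (q : Int × String × Int) : List String × PySem.Dict String Int × PySem.Dict String (List Int) :=
  let st' := if st.2.1.contains q.2.1 then st
             else (st.1 ++ [q.2.1], st.2.1.insert q.2.1 0, st.2.2.insert q.2.1 [])
  (st'.1, st'.2.1.modify q.2.1 0 (· + q.2.2), st'.2.2.modify q.2.1 [] (· ++ [q.1]))

theorem buildB_aux (l : List (String × Int)) :
    ∀ (k : Int) (order : List String) (total : PySem.Dict String Int)
      (songs : PySem.Dict String (List Int)),
      (∀ g, total.contains g = decide (g ∈ order)) →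
      (∀ g, songs.contains g = decide (g ∈ order)) →
      (((PySem.List.enumerate l k).foldl pvStepB (order, total, songs)).1 =
          PySem.Set.update order (l.map (·.1))) ∧
      (∀ g, ((PySem.List.enumerate l k).foldl pvStepB (order, total, songs)).2.1.getD g 0 =
          total.getD g 0 + ((l.filter (fun p => p.1 == g)).map (·.2)).sum) ∧
      (∀ g, ((PySem.List.enumerate l k).foldl pvStepB (order, total, songs)).2.2.getD g [] =
          songs.getD g [] ++ ((PySem.List.enumerate l k).filter (fun q => q.2.1 == g)).map (·.1)) := by
  induction l with
  | nil =>
    intro k order total songs hct hcs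
    refine ⟨by simp [PySem.List.enumerate_nil, PySem.Set.update_nil], by simp [PySem.List.enumerate_nil], by simp [PySem.List.enumerate_nil]⟩
  | cons p t ih =>
    intro k order total songs hct hcs
    rw [PySem.List.enumerate_cons, List.foldl_cons]
    by_cases hc : total.contains p.1 = true
    · have hstep : pvStepB (order, total, songs) (k, p) =
          (order, total.modify p.1 0 (· + p.2), songs.modify p.1 [] (· ++ [k])) := by
        simp [pvStepB, hc]
      rw [hstep]
      have hmem : p.1 ∈ order := by
        have h := hct p.1; rw [hc] at h; exact of_decide_eq_true h.symm
      have hct' : ∀ g, (total.modify p.1 0 (· + p.2)).contains g = decide (g ∈ order) := by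
        intro g
        rw [PySem.Dict.contains_modify, hct g]
        by_cases hg : g = p.1
        · subst hg; simp [hmem]
        · simp [hg]
      have hcs' : ∀ g, (songs.modify p.1 [] (· ++ [k])).contains g = decide (g ∈ order) := by
        intro g
        rw [PySem.Dict.contains_modify, hcs g]
        by_cases hg : g = p.1
        · subst hg; simp [hmem]
        · simp [hg]
      obtain ⟨h1, h2, h3⟩ := ih (k + 1) order _ _ hct' hcs'
      refine ⟨?_, ?_, ?_⟩
      · rw [h1, List.map_cons, PySem.Set.update_cons, PySem.Set.add_of_mem hmem]
      · intro g
        rw [h2 g, PySem.Dict.getD_modify, List.filter_cons]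
        by_cases hg : g = p.1
        · subst hg; simp; omega
        · have hb : (p.1 == g) = false := by simp; exact fun h => hg h.symm
          simp [hg, hb]
      · intro g
        rw [h3 g, PySem.Dict.getD_modify, List.filter_cons]
        by_cases hg : g = p.1
        · subst hg; simp
        · have hb : (p.1 == g) = false := by simp; exact fun h => hg h.symm
          simp [hg, hb]
    · have hcf : total.contains p.1 = false := by simpa using hc
      have hstep : pvStepB (order, total, songs) (k, p) =
          (order ++ [p.1], (total.insert p.1 0).modify p.1 0 (· + p.2),
           (songs.insert p.1 []).modify p.1 [] (· ++ [k])) := by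
        simp [pvStepB, hcf]
      rw [hstep]
      have hmem : p.1 ∉ order := by
        have h := hct p.1; rw [hcf] at h
        exact fun hmm => by simp [hmm] at h
      have hct' : ∀ g, ((total.insert p.1 0).modify p.1 0 (· + p.2)).contains g =
          decide (g ∈ order ++ [p.1]) := by
        intro g
        rw [PySem.Dict.contains_modify, PySem.Dict.contains_insert, hct g]
        by_cases hg : g = p.1
        · subst hg; simp
        · simp [hg]
      have hcs' : ∀ g, ((songs.insert p.1 []).modify p.1 [] (· ++ [k])).contains g =
          decide (g ∈ order ++ [p.1]) := by
        intro g
        rw [PySem.Dict.contains_modify, PySem.Dict.contains_insert, hcs g]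
        by_cases hg : g = p.1
        · subst hg; simp
        · simp [hg]
      obtain ⟨h1, h2, h3⟩ := ih (k + 1) (order ++ [p.1]) _ _ hct' hcs'
      refine ⟨?_, ?_, ?_⟩
      · rw [h1, List.map_cons, PySem.Set.update_cons, PySem.Set.add_of_not_mem hmem]
      · intro g
        rw [h2 g, PySem.Dict.getD_modify, PySem.Dict.getD_insert, List.filter_cons]
        by_cases hg : g = p.1
        · subst hg
          have h0 : total.getD p.1 0 = 0 := PySem.Dict.getD_of_not_contains _ _ hcf
          simp [h0]
        · have hb : (p.1 == g) = false := by simp; exact fun h => hg h.symm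
          simp [hg, hb]
          rw [PySem.Dict.getD_insert, if_neg hg]
      · intro g
        rw [h3 g, PySem.Dict.getD_modify, PySem.Dict.getD_insert, List.filter_cons]
        by_cases hg : g = p.1
        · subst hg
          have h0 : songs.getD p.1 [] = [] := PySem.Dict.getD_of_not_contains _ _ (by
              have h := hcs p.1; rw [h]; simp [hmem])
          simp [h0]
        · have hb : (p.1 == g) = false := by simp; exact fun h => hg h.symm
          simp [hg, hb]
          rw [PySem.Dict.getD_insert, if_neg hg]

theorem buildB_spec (s : List (String × Int)) :
    ((PySem.List.enumerate s 0).foldl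
      (fun (st : List String × PySem.Dict String Int × PySem.Dict String (List Int)) q =>
        let st' := if st.2.1.contains q.2.1 then st
                   else (st.1 ++ [q.2.1], st.2.1.insert q.2.1 0, st.2.2.insert q.2.1 [])
        (st'.1, st'.2.1.modify q.2.1 0 (· + q.2.2), st'.2.2.modify q.2.1 [] (· ++ [q.1])))
      ([], PySem.Dict.empty, PySem.Dict.empty)).1 = pvG s ∧
    (∀ g, ((PySem.List.enumerate s 0).foldl
      (fun (st : List String × PySem.Dict String Int × PySem.Dict String (List Int)) q =>
        let st' := if st.2.1.contains q.2.1 then st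
                   else (st.1 ++ [q.2.1], st.2.1.insert q.2.1 0, st.2.2.insert q.2.1 [])
        (st'.1, st'.2.1.modify q.2.1 0 (· + q.2.2), st'.2.2.modify q.2.1 [] (· ++ [q.1])))
      ([], PySem.Dict.empty, PySem.Dict.empty)).2.1.getD g 0 = pvT s g) ∧
    (∀ g, ((PySem.List.enumerate s 0).foldl
      (fun (st : List String × PySem.Dict String Int × PySem.Dict String (List Int)) q =>
        let st' := if st.2.1.contains q.2.1 then st
                   else (st.1 ++ [q.2.1], st.2.1.insert q.2.1 0, st.2.2.insert q.2.1 [])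
        (st'.1, st'.2.1.modify q.2.1 0 (· + q.2.2), st'.2.2.modify q.2.1 [] (· ++ [q.1])))
      ([], PySem.Dict.empty, PySem.Dict.empty)).2.2.getD g [] = pvS s g) := by
  obtain ⟨h1, h2, h3⟩ := buildB_aux s 0 [] PySem.Dict.empty PySem.Dict.empty
    (fun g => by simp [PySem.Dict.contains_empty]) (fun g => by simp [PySem.Dict.contains_empty])
  refine ⟨?_, ?_, ?_⟩
  · rw [show ((PySem.List.enumerate s 0).foldl
      (fun (st : List String × PySem.Dict String Int × PySem.Dict String (List Int)) q =>
        let st' := if st.2.1.contains q.2.1 then st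
                   else (st.1 ++ [q.2.1], st.2.1.insert q.2.1 0, st.2.2.insert q.2.1 [])
        (st'.1, st'.2.1.modify q.2.1 0 (· + q.2.2), st'.2.2.modify q.2.1 [] (· ++ [q.1])))
      ([], PySem.Dict.empty, PySem.Dict.empty)) =
      ((PySem.List.enumerate s 0).foldl pvStepB ([], PySem.Dict.empty, PySem.Dict.empty)) from rfl]
    rw [h1, PySem.Set.update_nil_left]; rfl
  · intro g
    rw [show ((PySem.List.enumerate s 0).foldl
      (fun (st : List String × PySem.Dict String Int × PySem.Dict String (List Int)) q =>
        let st' := if st.2.1.contains q.2.1 then st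
                   else (st.1 ++ [q.2.1], st.2.1.insert q.2.1 0, st.2.2.insert q.2.1 [])
        (st'.1, st'.2.1.modify q.2.1 0 (· + q.2.2), st'.2.2.modify q.2.1 [] (· ++ [q.1])))
      ([], PySem.Dict.empty, PySem.Dict.empty)) =
      ((PySem.List.enumerate s 0).foldl pvStepB ([], PySem.Dict.empty, PySem.Dict.empty)) from rfl]
    rw [h2 g, PySem.Dict.getD_empty]
    unfold pvT; omega
  · intro g
    rw [show ((PySem.List.enumerate s 0).foldl
      (fun (st : List String × PySem.Dict String Int × PySem.Dict String (List Int)) q =>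
        let st' := if st.2.1.contains q.2.1 then st
                   else (st.1 ++ [q.2.1], st.2.1.insert q.2.1 0, st.2.2.insert q.2.1 [])
        (st'.1, st'.2.1.modify q.2.1 0 (· + q.2.2), st'.2.2.modify q.2.1 [] (· ++ [q.1])))
      ([], PySem.Dict.empty, PySem.Dict.empty)) =
      ((PySem.List.enumerate s 0).foldl pvStepB ([], PySem.Dict.empty, PySem.Dict.empty)) from rfl]
    rw [h3 g, PySem.Dict.getD_empty]
    rfl

-- ===== the inner (two top songs) block =====

def pvRound (st : PySem.Dict Int Int × List Int) : PySem.Dict Int Int × List Int :=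
  match PySem.List.max? st.1.values (fun v => v) with
  | none => st
  | some m2 =>
    match st.1.keys.find? (fun k => m2 == st.1.getD k 0) with
    | none => st
    | some k => (st.1.erase k, st.2 ++ [k])

theorem keys_of_shape (M : List Int) (f : Int → Int) (t : PySem.Dict Int Int)
    (ht : t.items = M.map (fun i => (i, f i))) : t.keys = M := by
  show t.items.map (fun p => p.1) = M
  rw [ht, List.map_map]
  exact List.map_id _

theorem pvRound_spec (M : List Int) (f : Int → Int) (hne : M ≠ []) (hpw : M.Pairwise (· < ·))
    (t : PySem.Dict Int Int) (ht : t.items = M.map (fun i => (i, f i))) (ans : List Int) :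
    ∃ k0 M', pvRound (t, ans) = (⟨M'.map (fun i => (i, f i))⟩, ans ++ [k0]) ∧
      M.Perm (k0 :: M') ∧ (∀ y ∈ M', lexlt (fun i => -(f i)) (fun i => i) k0 y) ∧
      M'.Pairwise (· < ·) ∧ M'.length + 1 = M.length := by
  have hnd : M.Nodup := (hpw.imp (fun h => Int.ne_of_lt h))
  have hkeys : t.keys = M := keys_of_shape M f t ht
  have hknd : t.keys.Nodup := by rw [hkeys]; exact hnd
  have hvals : t.values = M.map f := by
    show t.items.map (fun p => p.2) = M.map f
    rw [ht, List.map_map]; rfl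
  have hgd : ∀ i ∈ M, t.getD i 0 = f i := by
    intro i hi
    exact PySem.Dict.getD_of_mem_items t (by rw [ht]; exact List.mem_map_of_mem hi) hknd 0
  -- max? is some
  obtain ⟨m2, hm2⟩ : ∃ m2, PySem.List.max? t.values (fun v => v) = some m2 := by
    cases hmax : PySem.List.max? t.values (fun v => v) with
    | none =>
      rw [PySem.List.max?_eq_none_iff, hvals, List.map_eq_nil_iff] at hmax
      exact absurd hmax hne
    | some m2 => exact ⟨m2, rfl⟩
  have hmax : ∀ y ∈ M, f y ≤ m2 := by
    intro y hy
    have := PySem.List.max?_isMax hm2 (f y) (by rw [hvals]; exact List.mem_map_of_mem hy)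
    simpa using this
  -- find? is some
  have hex : ∃ k ∈ t.keys, (m2 == t.getD k 0) = true := by
    have hmem := PySem.List.max?_mem hm2
    rw [hvals] at hmem
    obtain ⟨k, hk, hfk⟩ := List.mem_map.mp hmem
    exact ⟨k, by rw [hkeys]; exact hk, by rw [hgd k hk, hfk]; simp⟩
  obtain ⟨k0, hfind⟩ : ∃ k0, t.keys.find? (fun k => m2 == t.getD k 0) = some k0 := by
    cases hf : t.keys.find? (fun k => m2 == t.getD k 0) with
    | none =>
      have := List.find?_isSome.mpr hex
      rw [hf] at this; simp at this
    | some k0 => exact ⟨k0, rfl⟩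
  obtain ⟨hP, as, bs, hdec, hpre⟩ := List.find?_eq_some_iff_append.mp hfind
  rw [hkeys] at hdec
  have hk0M : k0 ∈ M := by rw [hdec]; exact List.mem_append_right _ (List.mem_cons_self)
  have hfk0 : f k0 = m2 := by
    rw [hgd k0 hk0M] at hP
    exact (eq_of_beq hP).symm
  have hndM := hnd
  rw [hdec] at hndM
  have hk0as : k0 ∉ as := by
    intro h
    exact (List.disjoint_of_nodup_append hndM) h (List.mem_cons_self)
  have hk0bs : k0 ∉ bs := by
    have := (List.nodup_append.mp hndM).2.1
    rw [List.nodup_cons] at this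
    exact this.1
  refine ⟨k0, as ++ bs, ?_, ?_, ?_, ?_, ?_⟩
  · -- the step itself
    show pvRound (t, ans) = _
    unfold pvRound
    simp only [hm2, hfind]
    have herase : (t.erase k0).items = ((as ++ bs).map (fun i => (i, f i))) := by
      show (t.items.filter (fun p => !(p.1 == k0))) = _
      rw [ht, List.filter_map]
      congr 1
      have : M.filter ((fun p => !(p.1 == k0)) ∘ (fun i => ((i : Int), f i))) =
          M.filter (fun i => !(i == k0)) := rfl
      have h2 : (as ++ k0 :: bs).filter (fun i => !(i == k0)) = as ++ bs := by
        rw [List.filter_append, List.filter_cons]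
        rw [List.filter_eq_self.mpr (fun a ha => by simp; exact fun h => hk0as (h ▸ ha)),
            List.filter_eq_self.mpr (fun a ha => by simp; exact fun h => hk0bs (h ▸ ha))]
        simp
      rw [this, hdec, h2]
    cases herased : t.erase k0 with
    | mk l =>
      have : l = (as ++ bs).map (fun i => (i, f i)) := by rw [← herase, herased]
      rw [this]
  · rw [hdec]; exact List.perm_middle
  · intro y hy
    have hyM : y ∈ M := by
      rw [hdec]
      rcases List.mem_append.mp hy with h | h
      · exact List.mem_append_left _ h
      · exact List.mem_append_right _ (List.mem_cons_of_mem _ h)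
    have hle := hmax y hyM
    rcases lt_or_eq_of_le hle with hlt | heq
    · left; show -(f k0) < -(f y); omega
    · right
      refine ⟨by show -(f k0) = -(f y); omega, ?_⟩
      show k0 < y
      -- f y = m2 : y cannot be in as, so it is after k0 in M
      have hybs : y ∈ bs := by
        rcases List.mem_append.mp hy with h | h
        · exfalso
          have := hpre y h
          rw [hgd y hyM, heq] at this
          simp at this
        · exact h
      have hpwd := hpw
      rw [hdec] at hpwd
      have := (List.pairwise_append.mp hpwd).2.1
      exact (List.pairwise_cons.mp this).1 y hybs
  · have hsub : (as ++ bs).Sublist M := by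
      rw [hdec]
      exact List.Sublist.append (List.Sublist.refl as) (List.sublist_cons_self k0 bs)
    exact List.Pairwise.sublist hsub hpw
  · rw [hdec]; simp; omega

def pvTop2 (s : List (String × Int)) (g : String) : List Int :=
  PySem.List.slice
    (PySem.List.sorted2 (pvS s g) (fun i => -(pvP s i)) (fun i => i)) none (some 2)

theorem inner_spec (s : List (String × Int)) (g : String) (ans : List Int) :
    (if (pvS s g).length < 2 then ans ++ pvS s g
     else
       ((PySem.List.pyRange 0 2 1).foldl
          (fun (st : PySem.Dict Int Int × List Int) _ =>
            match PySem.List.max? st.1.values (fun v => v) with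
            | none => st
            | some m2 =>
              match st.1.keys.find? (fun k => m2 == st.1.getD k 0) with
              | none => st
              | some k => (st.1.erase k, st.2 ++ [k]))
          ((pvS s g).foldl
            (fun d i => d.insert i (((PySem.List.pyGet? s i).getD ("", 0)).2)) PySem.Dict.empty,
           ans)).2) = ans ++ pvTop2 s g := by
  by_cases hlen : (pvS s g).length < 2
  · rw [if_pos hlen]
    cases hM : pvS s g with
    | nil =>
      unfold pvTop2
      rw [hM]
      rfl
    | cons i rest =>
      cases rest with
      | nil =>
        unfold pvTop2
        rw [hM]
        rw [PySem.List.slice_to _ (by norm_num)]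
        rfl
      | cons j t => rw [hM] at hlen; simp at hlen
  · rw [if_neg hlen]
    have hlen2 : 2 ≤ (pvS s g).length := by omega
    have hpw : (pvS s g).Pairwise (· < ·) := pvS_pairwise s g
    have hnd : (pvS s g).Nodup := pvS_nodup s g
    have htemp : ((pvS s g).foldl
        (fun d i => d.insert i (((PySem.List.pyGet? s i).getD ("", 0)).2)) PySem.Dict.empty) =
        (⟨(pvS s g).map (fun i => (i, pvP s i))⟩ : PySem.Dict Int Int) := by
      apply PySem.Dict.ext
      have h := PySem.Dict.items_foldl_insert_fresh (pvS s g) (fun i => i)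
        (fun i => pvP s i) PySem.Dict.empty
        (fun a _ => PySem.Dict.contains_empty a) (by simpa using hnd)
      exact h
    obtain ⟨k0, M1, hstep1, hperm1, hmin1, hpw1, hlen1⟩ :=
      pvRound_spec (pvS s g) (pvP s) (by intro h; rw [h] at hlen2; simp at hlen2) hpw
        ⟨(pvS s g).map (fun i => (i, pvP s i))⟩ rfl ans
    have hne1 : M1 ≠ [] := by
      intro h; rw [h] at hlen1; simp at hlen1; omega
    obtain ⟨k1, M2, hstep2, hperm2, hmin2, hpw2, hlen2'⟩ :=
      pvRound_spec M1 (pvP s) hne1 hpw1 ⟨M1.map (fun i => (i, pvP s i))⟩ rfl (ans ++ [k0])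
    have hr : PySem.List.pyRange 0 2 1 = [0, 1] := by decide
    rw [htemp, hr]
    have hfold : ([(0 : Int), 1].foldl
        (fun (st : PySem.Dict Int Int × List Int) _ =>
            match PySem.List.max? st.1.values (fun v => v) with
            | none => st
            | some m2 =>
              match st.1.keys.find? (fun k => m2 == st.1.getD k 0) with
              | none => st
              | some k => (st.1.erase k, st.2 ++ [k]))
        ((⟨(pvS s g).map (fun i => (i, pvP s i))⟩ : PySem.Dict Int Int), ans)) =
        pvRound (pvRound (⟨(pvS s g).map (fun i => (i, pvP s i))⟩, ans)) := rfl
    rw [hfold, hstep1, hstep2]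
    have hs1 : PySem.List.sorted2 (pvS s g) (fun i => -(pvP s i)) (fun i => i) =
        k0 :: PySem.List.sorted2 M1 (fun i => -(pvP s i)) (fun i => i) :=
      sorted2_cons_min _ _ _ k0 M1 hperm1 hmin1 (hpw1.imp (fun h => Int.ne_of_lt h))
    have hs2 : PySem.List.sorted2 M1 (fun i => -(pvP s i)) (fun i => i) =
        k1 :: PySem.List.sorted2 M2 (fun i => -(pvP s i)) (fun i => i) :=
      sorted2_cons_min _ _ _ k1 M2 hperm2 hmin2 (hpw2.imp (fun h => Int.ne_of_lt h))
    unfold pvTop2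
    rw [hs1, hs2, PySem.List.slice_to _ (by norm_num)]
    simp

-- ===== the main loop =====

theorem loop_eq (s : List (String × Int)) (gis : PySem.Dict String (List Int))
    (hgis : ∀ g, gis.getD g [] = pvS s g) :
    ∀ (n : Nat) (d : PySem.Dict String Int) (ans : List Int),
      d.items.length ≤ n → d.items.Sublist (pvE s) →
      solutionLoop s gis n d ans =
        ans ++ (PySem.List.sorted2 (d.items.map (fun p => pvPos s p.1))
                 (fun j => -(pvT s (pvGet s j))) (fun j => -j)).flatMap
               (fun j => pvTop2 s (pvGet s j)) := by
  intro n
  induction n with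
  | zero =>
    intro d ans hlen hsub
    have hnil : d.items = [] := List.length_eq_zero_iff.mp (Nat.le_zero.mp hlen)
    show ans = _
    rw [hnil]
    simp [sorted2_nil]
  | succ n ih =>
    intro d ans hlen hsub
    by_cases hemp : d.items.isEmpty = true
    · have hnil : d.items = [] := List.isEmpty_iff.mp hemp
      show (if d.items.isEmpty then ans else _) = _
      rw [if_pos hemp, hnil]
      simp [sorted2_nil]
    · have hne : d.items ≠ [] := fun h => hemp (List.isEmpty_iff.mpr h)
      have hshape : ∀ p ∈ d.items, p = (p.1, pvT s p.1) := by
        intro p hp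
        have hpE : p ∈ pvE s := hsub.subset hp
        unfold pvE at hpE
        obtain ⟨g, _, hpg⟩ := List.mem_map.mp hpE
        rw [← hpg]
      have hKsub : (d.items.map (·.1)).Sublist (pvG s) := by
        have h := hsub.map (·.1)
        rw [pvE_map_fst] at h
        exact h
      have hKnd : (d.items.map (·.1)).Nodup := (pvG_nodup s).sublist hKsub
      have hitems : d.items = (d.items.map (·.1)).map (fun k => (k, pvT s k)) := by
        have h : d.items.map (fun p => (p.1, pvT s p.1)) = d.items.map id :=
          List.map_congr_left (fun p hp => (hshape p hp).symm)
        rw [List.map_map]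
        rw [List.map_id] at h
        exact h.symm
      have hvals : d.values = (d.items.map (·.1)).map (pvT s) := by
        show d.items.map (·.2) = _
        conv_lhs => rw [hitems]
        simp only [List.map_map]
        rfl
      have hgd : ∀ k ∈ d.items.map (·.1), d.getD k 0 = pvT s k := by
        intro k hk
        refine PySem.Dict.getD_of_mem_items d ?_ hKnd 0
        conv_lhs => rw [hitems]
        exact List.mem_map_of_mem hk
      obtain ⟨m, hm⟩ : ∃ m, PySem.List.max? d.values (fun v => v) = some m := by
        cases hmax : PySem.List.max? d.values (fun v => v) with
        | none =>
          rw [PySem.List.max?_eq_none_iff] at hmax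
          have hl := congrArg List.length hmax
          simp only [PySem.Dict.values, List.length_map, List.length_nil] at hl
          exact absurd (List.length_eq_zero_iff.mp hl) hne
        | some m => exact ⟨m, rfl⟩
      have hmaxv : ∀ k ∈ d.items.map (·.1), pvT s k ≤ m := by
        intro k hk
        have := PySem.List.max?_isMax hm (pvT s k) (by rw [hvals]; exact List.mem_map_of_mem hk)
        simpa using this
      have hexP : ∃ k ∈ d.keys, (d.getD k 0 == m) = true := by
        have hmem := PySem.List.max?_mem hm
        rw [hvals] at hmem
        obtain ⟨k, hk, hfk⟩ := List.mem_map.mp hmem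
        exact ⟨k, hk, by rw [hgd k hk, hfk]; simp⟩
      obtain ⟨l1, l2, hdec, hPg0, hl2⟩ :=
        foldl_lastpick (fun k => d.getD k 0 == m) "" d.keys hexP
      set g0 := d.keys.foldl (fun acc k => if d.getD k 0 == m then k else acc) "" with hg0def
      have hg0K : g0 ∈ d.items.map (·.1) := by
        show g0 ∈ d.keys
        rw [hdec]
        exact List.mem_append_right _ (List.mem_cons_self)
      have hTg0 : pvT s g0 = m := by
        have := eq_of_beq hPg0
        rw [hgd g0 hg0K] at this
        exact this
      have hndK := hKnd
      rw [show d.items.map (·.1) = d.keys from rfl, hdec] at hndK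
      have hg0l1 : g0 ∉ l1 := fun h =>
        (List.disjoint_of_nodup_append hndK) h (List.mem_cons_self)
      have hg0l2 : g0 ∉ l2 := by
        have := (List.nodup_append.mp hndK).2.1
        rw [List.nodup_cons] at this
        exact this.1
      have hK' : d.keys.filter (fun k => !(k == g0)) = l1 ++ l2 := by
        rw [hdec, List.filter_append, List.filter_cons]
        rw [List.filter_eq_self.mpr (fun a ha => by simp; exact fun h => hg0l1 (h ▸ ha)),
            List.filter_eq_self.mpr (fun a ha => by simp; exact fun h => hg0l2 (h ▸ ha))]
        simp
      have herase : (d.erase g0).items = (l1 ++ l2).map (fun k => (k, pvT s k)) := by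
        show d.items.filter (fun p => !(p.1 == g0)) = _
        conv_lhs => rw [hitems]
        rw [List.filter_map, ← hK']
        rfl
      have hsub12 : (l1 ++ l2).Sublist d.keys := by
        rw [hdec]
        exact List.Sublist.append (List.Sublist.refl l1) (List.sublist_cons_self g0 l2)
      have hpwK : d.keys.Pairwise (fun a b => pvPos s a < pvPos s b) :=
        List.Pairwise.sublist hKsub (pvG_pairwise_pos s)
      have hmin : ∀ k ∈ l1 ++ l2,
          lexlt (fun j => -(pvT s (pvGet s j))) (fun j => -j) (pvPos s g0) (pvPos s k) := by
        intro k hk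
        have hkK : k ∈ d.keys := hsub12.subset hk
        have hkG : k ∈ pvG s := hKsub.subset hkK
        have hg0G : g0 ∈ pvG s := hKsub.subset hg0K
        have e1 : pvGet s (pvPos s g0) = g0 := pvGet_pos s g0 hg0G
        have e2 : pvGet s (pvPos s k) = k := pvGet_pos s k hkG
        have hle := hmaxv k hkK
        rcases lt_or_eq_of_le hle with hlt | heq
        · left
          show -(pvT s (pvGet s (pvPos s g0))) < -(pvT s (pvGet s (pvPos s k)))
          rw [e1, e2, hTg0]
          omega
        · right
          have e3 : -(pvT s (pvGet s (pvPos s g0))) = -(pvT s (pvGet s (pvPos s k))) := by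
            rw [e1, e2, hTg0, heq]
          refine ⟨e3, ?_⟩
          show -(pvPos s g0) < -(pvPos s k)
          have hkl1 : k ∈ l1 := by
            rcases List.mem_append.mp hk with h | h
            · exact h
            · exfalso
              have := hl2 k h
              rw [hgd k hkK, heq] at this
              simp at this
          have hpwd := hpwK
          rw [hdec] at hpwd
          have := (List.pairwise_append.mp hpwd).2.2 k hkl1 g0 (List.mem_cons_self)
          omega
      have hperm : (d.keys.map (pvPos s)).Perm (pvPos s g0 :: (l1 ++ l2).map (pvPos s)) := by
        have hp : d.keys.Perm (g0 :: (l1 ++ l2)) := by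
          rw [hdec]
          exact List.perm_middle
        exact hp.map (pvPos s)
      have hminmap : ∀ y ∈ (l1 ++ l2).map (pvPos s),
          lexlt (fun j => -(pvT s (pvGet s j))) (fun j => -j) (pvPos s g0) y := by
        intro y hy
        obtain ⟨k, hk, hky⟩ := List.mem_map.mp hy
        rw [← hky]
        exact hmin k hk
      have hndmap : ((l1 ++ l2).map (pvPos s)).Pairwise
          (fun a b => (fun j => -j) a ≠ (fun j => -j) b) := by
        have hpw12 : (l1 ++ l2).Pairwise (fun a b => pvPos s a < pvPos s b) :=
          List.Pairwise.sublist hsub12 hpwK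
        exact (List.pairwise_map.mpr (hpw12.imp (fun h => by simp; omega)))
      have hcons := sorted2_cons_min (fun j => -(pvT s (pvGet s j))) (fun j => -j)
        (d.keys.map (pvPos s)) (pvPos s g0) ((l1 ++ l2).map (pvPos s)) hperm hminmap hndmap
      -- now unfold one loop step
      show (if d.items.isEmpty then ans else _) = _
      rw [if_neg hemp]
      rw [hm]
      show (if (gis.getD g0 []).length < 2
            then solutionLoop s gis n (d.erase g0) (ans ++ gis.getD g0 [])
            else solutionLoop s gis n (d.erase g0) _) = _
      rw [hgis g0]
      rw [← apply_ite (solutionLoop s gis n (d.erase g0))]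
      rw [inner_spec s g0 ans]
      have hlen' : (d.erase g0).items.length ≤ n := by
        have h1 : (d.erase g0).items.length = l1.length + l2.length := by rw [herase]; simp
        have h2 : d.keys.length = l1.length + (l2.length + 1) := by rw [hdec]; simp
        have h3 : d.keys.length = d.items.length := by
          show (d.items.map (fun p => p.1)).length = d.items.length
          simp
        omega
      have hsub' : (d.erase g0).items.Sublist (pvE s) := by
        have h4 : (d.erase g0).items.Sublist d.items := List.filter_sublist
        exact h4.trans hsub
      rw [ih (d.erase g0) (ans ++ pvTop2 s g0) hlen' hsub']
      have hmapmap : d.items.map (fun p => pvPos s p.1) = d.keys.map (pvPos s) := by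
        show d.items.map (fun p => pvPos s p.1) = (d.items.map (·.1)).map (pvPos s)
        rw [List.map_map]
        rfl
      have hmapmap' : (d.erase g0).items.map (fun p => pvPos s p.1) = (l1 ++ l2).map (pvPos s) := by
        rw [herase, List.map_map]
        rfl
      rw [hmapmap, hmapmap', hcons, List.flatMap_cons]
      rw [pvGet_pos s g0 (hKsub.subset hg0K)]
      rw [List.append_assoc]

-- ===== VERDICT (by name: the statement is the Claim_ definition above) =====
theorem solution_spec : Claim_equal_solution := by
  unfold Claim_equal_solution
  intro genres plays _
  unfold Spec_solution
  obtain ⟨hAitems, hAgis⟩ := buildA_spec (genres.zip plays)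
  obtain ⟨hB1, hB2, hB3⟩ := buildB_spec (genres.zip plays)
  have hA : solution genres plays =
      solutionLoop (genres.zip plays)
        ((PySem.List.enumerate (genres.zip plays) 0).foldl
          (fun (st : PySem.Dict String Int × PySem.Dict String (List Int)) q =>
            (st.1.modify q.2.1 0 (· + q.2.2), st.2.modify q.2.1 [] (· ++ [q.1])))
          (PySem.Dict.empty, PySem.Dict.empty)).2
        ((PySem.List.enumerate (genres.zip plays) 0).foldl
          (fun (st : PySem.Dict String Int × PySem.Dict String (List Int)) q =>
            (st.1.modify q.2.1 0 (· + q.2.2), st.2.modify q.2.1 [] (· ++ [q.1])))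
          (PySem.Dict.empty, PySem.Dict.empty)).1.size
        ((PySem.List.enumerate (genres.zip plays) 0).foldl
          (fun (st : PySem.Dict String Int × PySem.Dict String (List Int)) q =>
            (st.1.modify q.2.1 0 (· + q.2.2), st.2.modify q.2.1 [] (· ++ [q.1])))
          (PySem.Dict.empty, PySem.Dict.empty)).1 [] := rfl
  have hB : solution_alt genres plays =
      (PySem.List.sorted2 (PySem.List.pyRange 0
          (((PySem.List.enumerate (genres.zip plays) 0).foldl
            (fun (st : List String × PySem.Dict String Int × PySem.Dict String (List Int)) q =>
              let st' := if st.2.1.contains q.2.1 then st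
                         else (st.1 ++ [q.2.1], st.2.1.insert q.2.1 0, st.2.2.insert q.2.1 [])
              (st'.1, st'.2.1.modify q.2.1 0 (· + q.2.2), st'.2.2.modify q.2.1 [] (· ++ [q.1])))
            ([], PySem.Dict.empty, PySem.Dict.empty)).1.length) 1)
          (fun j => -(((PySem.List.enumerate (genres.zip plays) 0).foldl
            (fun (st : List String × PySem.Dict String Int × PySem.Dict String (List Int)) q =>
              let st' := if st.2.1.contains q.2.1 then st
                         else (st.1 ++ [q.2.1], st.2.1.insert q.2.1 0, st.2.2.insert q.2.1 [])
              (st'.1, st'.2.1.modify q.2.1 0 (· + q.2.2), st'.2.2.modify q.2.1 [] (· ++ [q.1])))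
            ([], PySem.Dict.empty, PySem.Dict.empty)).2.1.getD
              ((PySem.List.pyGet? ((PySem.List.enumerate (genres.zip plays) 0).foldl
                (fun (st : List String × PySem.Dict String Int × PySem.Dict String (List Int)) q =>
                  let st' := if st.2.1.contains q.2.1 then st
                             else (st.1 ++ [q.2.1], st.2.1.insert q.2.1 0, st.2.2.insert q.2.1 [])
                  (st'.1, st'.2.1.modify q.2.1 0 (· + q.2.2), st'.2.2.modify q.2.1 [] (· ++ [q.1])))
                ([], PySem.Dict.empty, PySem.Dict.empty)).1 j).getD "") 0))
          (fun j => -j)).foldl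
        (fun ans j =>
          ans ++ PySem.List.slice
            (PySem.List.sorted2 (((PySem.List.enumerate (genres.zip plays) 0).foldl
              (fun (st : List String × PySem.Dict String Int × PySem.Dict String (List Int)) q =>
                let st' := if st.2.1.contains q.2.1 then st
                           else (st.1 ++ [q.2.1], st.2.1.insert q.2.1 0, st.2.2.insert q.2.1 [])
                (st'.1, st'.2.1.modify q.2.1 0 (· + q.2.2), st'.2.2.modify q.2.1 [] (· ++ [q.1])))
              ([], PySem.Dict.empty, PySem.Dict.empty)).2.2.getD
                ((PySem.List.pyGet? ((PySem.List.enumerate (genres.zip plays) 0).foldl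
                  (fun (st : List String × PySem.Dict String Int × PySem.Dict String (List Int)) q =>
                    let st' := if st.2.1.contains q.2.1 then st
                               else (st.1 ++ [q.2.1], st.2.1.insert q.2.1 0, st.2.2.insert q.2.1 [])
                    (st'.1, st'.2.1.modify q.2.1 0 (· + q.2.2), st'.2.2.modify q.2.1 [] (· ++ [q.1])))
                  ([], PySem.Dict.empty, PySem.Dict.empty)).1 j).getD "") [])
              (fun i => -((PySem.List.pyGet? (genres.zip plays) i).getD ("", 0)).2)
              (fun i => i))
            none (some 2)) [] := rfl
  rw [hA, hB]
  simp only [hB1, hB2, hB3]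
  have hsz : ((PySem.List.enumerate (genres.zip plays) 0).foldl
      (fun (st : PySem.Dict String Int × PySem.Dict String (List Int)) q =>
        (st.1.modify q.2.1 0 (· + q.2.2), st.2.modify q.2.1 [] (· ++ [q.1])))
      (PySem.Dict.empty, PySem.Dict.empty)).1.size =
      ((PySem.List.enumerate (genres.zip plays) 0).foldl
      (fun (st : PySem.Dict String Int × PySem.Dict String (List Int)) q =>
        (st.1.modify q.2.1 0 (· + q.2.2), st.2.modify q.2.1 [] (· ++ [q.1])))
      (PySem.Dict.empty, PySem.Dict.empty)).1.items.length := rfl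
  rw [hsz]
  rw [loop_eq (genres.zip plays) _ hAgis _ _ [] (Nat.le_refl _) (hAitems ▸ List.Sublist.refl _)]
  rw [PySem.List.foldl_append_eq_flatMap]
  rw [hAitems]
  have hmap : (pvE (genres.zip plays)).map (fun p => pvPos (genres.zip plays) p.1) =
      PySem.List.pyRange 0 ((pvG (genres.zip plays)).length) 1 := by
    rw [← map_pos_pvG]
    unfold pvE
    rw [List.map_map]
    rfl
  rw [hmap]
  simp only [List.nil_append]
  rfl
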